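-- pv_equiv track=rewrite | github.com/neochristou/tensorflow | fuzz-utils/synth.py | split_attrs
-- ===== SOURCE A (Python) =====
-- def split_attrs(attrs):
--
--     if len(attrs) == 0:
--         return []
--
--     parsed_attrs = []
--     attrs = attrs.split(", ")
--
--     idx = 0
--     for attr in attrs:
--
--         if "=" in attr:
--             parsed_attrs.append(attr)
--             idx += 1
--         else:
--             if len(parsed_attrs) > 0:
--                 parsed_attrs[idx - 1] += ", " + attr
--
--     return parsed_attrs
-- ===== SOURCE B (Python) =====
-- def split_attrs(attrs):
--     pieces = attrs.split(", ")
--     # drop leading continuation pieces (before the first real "key=value" attribute)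
--     while pieces and "=" not in pieces[0]:
--         pieces = pieces[1:]
--     out = []
--     while pieces:
--         head, rest = pieces[0], pieces[1:]
--         k = 0
--         while k < len(rest) and "=" not in rest[k]:
--             k += 1
--         out.append(", ".join([head] + rest[:k]))
--         pieces = rest[k:]
--     return out
-- ===== Notes on version B (the rewrite author's own statement) =====
-- stated objective: alternative
-- what changed: B replaces A's single pass that mutates parsed_attrs[idx-1] under an index counter with a two-phase decomposition: drop the leading continuation pieces, then repeatedly slice off one run (a '='-piece plus its following continuation pieces) and join it with ', '.
import Mathlib
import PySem

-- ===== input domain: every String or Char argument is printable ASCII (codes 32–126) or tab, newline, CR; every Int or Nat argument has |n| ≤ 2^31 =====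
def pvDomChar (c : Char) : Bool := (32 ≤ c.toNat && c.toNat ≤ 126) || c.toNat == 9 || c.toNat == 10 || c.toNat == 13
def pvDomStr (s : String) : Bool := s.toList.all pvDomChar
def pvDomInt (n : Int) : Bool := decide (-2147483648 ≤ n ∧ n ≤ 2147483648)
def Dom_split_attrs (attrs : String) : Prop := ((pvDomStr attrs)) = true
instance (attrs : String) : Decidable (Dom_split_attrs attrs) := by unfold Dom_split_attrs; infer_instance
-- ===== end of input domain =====

-- B replaces A's single mutating pass with a two-phase decomposition (drop leading continuations,
-- then slice off one run per '='-piece and join it); same O(n) cost, objective: alternative.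

-- ===== PORT A =====
-- one loop step of A: append a '='-piece (idx += 1), else merge into parsed_attrs[idx-1]
-- ('+=' on strings is ported as PySem.Str.join "" [old, ", ", attr], exact for Python concatenation)
def pvStepA (st : List String × Nat) (attr : String) : List String × Nat :=
  if PySem.Str.isIn "=" attr then (st.1 ++ [attr], st.2 + 1)
  else if st.1.length > 0 then
    (st.1.set (st.2 - 1) (PySem.Str.join "" [st.1.getD (st.2 - 1) "", ", ", attr]), st.2)
  else st

def split_attrs (attrs : String) : List String :=
  if PySem.Str.len attrs = 0 then []
  else
    -- attrs.split(", "): sep ≠ "" so split? is always some; getD is exact here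
    let pieces := (PySem.Str.split? attrs ", ").getD []
    (pieces.foldl pvStepA ([], 0)).1

-- ===== PORT B =====
-- a continuation piece: no '=' in it
def pvNoEq (q : String) : Bool := !(PySem.Str.isIn "=" q)

-- B's second while loop: take one run (head plus following continuation pieces), join it, recurse
def pvChunks : List String → List String
  | [] => []
  | p :: rest =>
      PySem.Str.join ", " (p :: rest.takeWhile pvNoEq) :: pvChunks (rest.dropWhile pvNoEq)
termination_by l => l.length
decreasing_by
  simpa using Nat.lt_succ_of_le (List.length_dropWhile_le pvNoEq rest)

def split_attrs_alt (attrs : String) : List String :=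
  pvChunks (((PySem.Str.split? attrs ", ").getD []).dropWhile pvNoEq)

-- ===== PRECONDITION & SPEC =====
def Spec_split_attrs (attrs : String) (out : List String) : Prop := out = split_attrs_alt attrs
instance (attrs : String) (out : List String) : Decidable (Spec_split_attrs attrs out) := by unfold Spec_split_attrs; infer_instance

-- ===== CLAIM (what is proved, stated in full; the proofs are below) =====
def Claim_equal_split_attrs : Prop := ∀ (attrs : String), Dom_split_attrs attrs → Spec_split_attrs attrs (split_attrs attrs)

-- ===== LEMMAS AND PROOFS =====

lemma pv_join_single (cur : String) : PySem.Str.join ", " [cur] = cur := by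
  apply String.toList_inj.mp
  simp [PySem.Str.toList_join, PySem.Chars.join_singleton]

-- joining the merged string is the same as joining its two pieces separately
lemma pv_join_merge (cur p : String) (l : List String) :
    PySem.Str.join ", " (PySem.Str.join "" [cur, ", ", p] :: l)
      = PySem.Str.join ", " (cur :: p :: l) := by
  apply String.toList_inj.mp
  cases l with
  | nil =>
      simp [PySem.Str.toList_join, PySem.Chars.join_singleton, PySem.Chars.join_cons_cons]
  | cons q l' =>
      simp [PySem.Str.toList_join, PySem.Chars.join_singleton, PySem.Chars.join_cons_cons]

-- A's fold from a nonempty accumulator builds acc ++ the chunks of (cur :: ps)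
lemma pv_foldA_nonempty (ps : List String) : ∀ (acc : List String) (cur : String),
    (ps.foldl pvStepA (acc ++ [cur], acc.length + 1)).1 = acc ++ pvChunks (cur :: ps) := by
  induction ps with
  | nil =>
      intro acc cur
      simp [pvChunks, pv_join_single]
  | cons p rest ih =>
      intro acc cur
      by_cases hp : PySem.Str.isIn "=" p
      · have hp' : PySem.Chars.isIn ['='] p.toList = true := by simpa using hp
        have e1 : pvStepA (acc ++ [cur], acc.length + 1) p
            = ((acc ++ [cur]) ++ [p], (acc ++ [cur]).length + 1) := by
          simp [pvStepA, hp']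
        rw [List.foldl_cons, e1, ih (acc ++ [cur]) p]
        conv_rhs => rw [pvChunks]
        simp [pvNoEq, hp', pv_join_single]
      · have hp' : PySem.Chars.isIn ['='] p.toList = false := by simpa using hp
        have e1 : pvStepA (acc ++ [cur], acc.length + 1) p
            = (acc ++ [PySem.Str.join "" [cur, ", ", p]], acc.length + 1) := by
          simp [pvStepA, hp']
        rw [List.foldl_cons, e1, ih acc (PySem.Str.join "" [cur, ", ", p])]
        congr 1
        conv_lhs => rw [pvChunks]
        conv_rhs => rw [pvChunks]
        simp [pvNoEq, hp', pv_join_merge]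

-- A's fold from the empty accumulator drops leading continuations and builds the chunks
lemma pv_foldA_empty (ps : List String) :
    (ps.foldl pvStepA ([], 0)).1 = pvChunks (ps.dropWhile pvNoEq) := by
  induction ps with
  | nil => simp [pvChunks]
  | cons p rest ih =>
      by_cases hp : PySem.Str.isIn "=" p
      · have hp' : PySem.Chars.isIn ['='] p.toList = true := by simpa using hp
        have e1 : pvStepA ([], 0) p = (([] : List String) ++ [p], ([] : List String).length + 1) := by
          simp [pvStepA, hp']
        rw [List.foldl_cons, e1, pv_foldA_nonempty rest [] p]
        simp [pvNoEq, hp']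
      · have hp' : PySem.Chars.isIn ['='] p.toList = false := by simpa using hp
        have e1 : pvStepA ([], 0) p = ([], 0) := by
          simp [pvStepA, hp']
        rw [List.foldl_cons, e1, ih]
        simp [pvNoEq, hp']

-- an empty attrs string splits into the single empty piece
lemma pv_split_empty (attrs : String) (h : attrs.toList = []) :
    (PySem.Str.split? attrs ", ").getD [] = [""] := by
  have hm := PySem.Str.split?_map attrs ", "
  have hsep : (", " : String).toList = [',', ' '] := by simp
  rw [h, hsep] at hm
  have hc : PySem.Chars.split? [] [',', ' '] = some [[]] := rfl
  rw [hc] at hm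
  cases hx : PySem.Str.split? attrs ", " with
  | none => rw [hx] at hm; simp at hm
  | some l =>
      rw [hx] at hm
      simp only [Option.map_some, Option.some.injEq] at hm
      cases l with
      | nil => simp at hm
      | cons a t =>
          cases t with
          | nil =>
              simp only [List.map_cons, List.map_nil, List.cons.injEq, and_true] at hm
              have : a = "" := String.toList_inj.mp (by simpa using hm)
              simp [this]
          | cons b t' => simp at hm

-- ===== VERDICT (by name: the statement is the Claim_ definition above) =====
theorem split_attrs_spec : Claim_equal_split_attrs := by
  intro attrs _
  unfold Spec_split_attrs split_attrs split_attrs_alt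
  split_ifs with h
  · have h0 : attrs.toList = [] := by
      have hl := PySem.Str.len_eq attrs
      rw [h] at hl
      simpa using hl.symm
    rw [pv_split_empty attrs h0]
    have h1 : pvNoEq "" = true := by
      unfold pvNoEq
      have h2 : PySem.Chars.isIn ['='] [] = false := by decide
      simp [h2]
    simp [h1, pvChunks]
  · exact pv_foldA_empty _
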